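-- pv_equiv track=rewrite | github.com/dchampion/crypto | src/core/primes.py | _factor_n
-- ===== SOURCE A (Python) =====
-- def _factor_n(n: int) -> tuple[int, int]:
--     # Returns the tuple (s, t), after conversion of the supplied positive odd integer
--     # n to the form (2^t * s) + 1, where s is the greatest odd divisor of n-1. This
--     # function is a helper for _is_composite().
--
--     _validate_param(n)
--
--     s = n - 1
--     t = 0
--
--     while s % 2 == 0:
--         s //= 2
--         t = t + 1
--
--     return s, t
--
-- def _validate_param(n: int) -> None:
--     assert isinstance(n, int) and n >= 3 and n % 2 != 0
-- ===== SOURCE B (Python) =====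
-- def _factor_n(n: int) -> tuple[int, int]:
--     # Same contract as A: n odd, >= 3; returns (s, t) with n - 1 == 2**t * s, s odd.
--     # Straight-line bit computation instead of a division loop.
--     _validate_param(n)
--     s = n - 1
--     t = (s & -s).bit_length() - 1
--     return s >> t, t
--
-- def _validate_param(n: int) -> None:
--     assert isinstance(n, int) and n >= 3 and n % 2 != 0
-- ===== Notes on version B (the rewrite author's own statement) =====
-- stated objective: alternative
-- what changed: The repeated halve-while-even loop is replaced by a straight-line bit computation: t is read off as the bit length of the lowest set bit of n-1 (s & -s), and the odd part is a single shift s >> t.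
import Mathlib
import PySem

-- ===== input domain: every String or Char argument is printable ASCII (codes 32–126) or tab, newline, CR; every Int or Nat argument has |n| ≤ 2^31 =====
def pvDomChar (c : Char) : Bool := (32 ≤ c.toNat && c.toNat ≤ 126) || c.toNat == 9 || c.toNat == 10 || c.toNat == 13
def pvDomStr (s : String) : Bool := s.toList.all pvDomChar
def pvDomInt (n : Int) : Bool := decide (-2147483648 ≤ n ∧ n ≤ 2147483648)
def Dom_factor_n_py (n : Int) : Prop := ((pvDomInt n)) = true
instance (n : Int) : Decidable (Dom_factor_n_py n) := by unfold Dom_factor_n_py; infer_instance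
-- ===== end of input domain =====

-- B replaces A's halve-while-even loop by a straight-line bit computation
-- (t = bit_length(s & -s) - 1, odd part = s >> t); equal results proved on all odd n ≥ 3.


-- ===== PORT A =====
-- the 'while s % 2 == 0' loop; the '0 < s' guard only makes the recursion total
-- (inside Pre_ the loop always starts from s = n - 1 ≥ 2, where it is faithful)
def pvLoopA (s t : Int) : Int × Int :=
  if h : 0 < s ∧ PySem.Int.mod s 2 = 0 then
    pvLoopA (PySem.Int.floordiv s 2) (t + 1)
  else
    (s, t)
termination_by s.toNat
decreasing_by
  have h2 : PySem.Int.floordiv s 2 = s / 2 := PySem.Int.floordiv_eq_ediv_of_pos (by omega)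
  have hd : (2 : Int) ∣ s := (PySem.Int.mod_eq_zero_iff_dvd s 2).mp h.2
  omega

def factor_n_py (n : Int) : Int × Int :=
  -- _validate_param(n): the assertion is Pre_factor_n_py
  pvLoopA (n - 1) 0

-- ===== PORT B =====
def factor_n_py_alt (n : Int) : Int × Int :=
  -- _validate_param(n): the assertion is Pre_factor_n_py
  let s := n - 1
  let t := PySem.Int.bitLength (PySem.Int.band s (-s)) - 1
  (s >>> t, (t : Int))

-- ===== PRECONDITION & SPEC =====
-- exactly _validate_param's assertion: A (and B) raise AssertionError unless n ≥ 3 and n is odd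
def Pre_factor_n_py (n : Int) : Prop := 3 ≤ n ∧ PySem.Int.mod n 2 ≠ 0
instance (n : Int) : Decidable (Pre_factor_n_py n) := by unfold Pre_factor_n_py; infer_instance
def pvWitness_factor_n_py : Int := 13

def Spec_factor_n_py (n : Int) (out : Int × Int) : Prop := out = factor_n_py_alt n
instance (n : Int) (out : Int × Int) : Decidable (Spec_factor_n_py n out) := by unfold Spec_factor_n_py; infer_instance

-- ===== CLAIM (what is proved, stated in full; the proofs are below) =====
def Claim_equal_factor_n_py : Prop := ∀ (n : Int), Dom_factor_n_py n → Pre_factor_n_py n → Spec_factor_n_py n (factor_n_py n)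

-- ===== LEMMAS AND PROOFS =====

-- the number B computes: bit_length((s & -s)) - 1, expressed over Nat (lowest set bit of m is m - (m &&& (m-1)))
def pvK (m : Nat) : Nat := PySem.Int.bitLength (((m - (m &&& (m - 1)) : Nat) : Int)) - 1

theorem pv_and_odd (a : Nat) : (2*a+1) &&& (2*a) = 2*a := by
  have hs : Nat.bitwise and a a = a := Nat.and_self a
  have := Nat.bitwise_bit (f := and) (m := a) (n := a) (a := true) (b := false)
  simpa [Nat.bit, HAnd.hAnd, AndOp.and, Nat.land, hs] using this

theorem pv_and_even (a : Nat) (h : 0 < a) : (2*a) &&& (2*a-1) = 2*(a &&& (a-1)) := by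
  have := Nat.bitwise_bit (f := and) (m := a) (n := a-1) (a := false) (b := true)
  have h2 : 2*(a-1)+1 = 2*a-1 := by omega
  simp only [Nat.bit, cond_true, cond_false, h2] at this
  simpa [HAnd.hAnd, AndOp.and, Nat.land] using this

-- Python's s & -s for positive s, in terms of Nat bitwise and
theorem pv_band_neg_self (m : Nat) (hm : 0 < m) :
    PySem.Int.band (m : Int) (-(m : Int)) = ((m - (m &&& (m - 1)) : Nat) : Int) := by
  have h1 : ¬ (0 ≤ -(m : Int)) := by omega
  have h2 : (-(-(m : Int)) - 1).toNat = m - 1 := by omega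
  have h3 : ((m : Int)).toNat = m := by omega
  unfold PySem.Int.band
  rw [if_pos (by omega : (0:Int) ≤ (m : Int)), if_neg h1, h2, h3]

theorem pvK_odd (m : Nat) (h : m % 2 = 1) : pvK m = 0 := by
  obtain ⟨a, rfl⟩ : ∃ a, m = 2*a+1 := ⟨m/2, by omega⟩
  unfold pvK
  have he : 2*a+1 - ((2*a+1) &&& (2*a+1-1)) = 1 := by
    have h1 : 2*a+1-1 = 2*a := rfl
    rw [h1, pv_and_odd a]
    omega
  rw [he]
  decide

theorem pv_bitLength_pos (x : Nat) (hx : 0 < x) : 1 ≤ PySem.Int.bitLength (x : Int) := by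
  rw [PySem.Int.bitLength_natCast hx]; omega

theorem pvK_even (a : Nat) (ha : 0 < a) : pvK (2*a) = pvK a + 1 := by
  have hle : a &&& (a-1) ≤ a - 1 := Nat.and_le_right
  have hlow : 2*a - ((2*a) &&& (2*a-1)) = 2*(a - (a &&& (a-1))) := by
    rw [pv_and_even a ha]; omega
  have hpos : 0 < a - (a &&& (a-1)) := by omega
  have hbl : PySem.Int.bitLength ((2*(a - (a &&& (a-1))) : Nat) : Int)
      = PySem.Int.bitLength (((a - (a &&& (a-1)) : Nat)) : Int) + 1 := by
    rw [PySem.Int.bitLength_natCast (by omega : 0 < 2*(a - (a &&& (a-1))))]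
    congr 2
    omega
  have h1 := pv_bitLength_pos _ hpos
  unfold pvK
  rw [hlow, hbl]
  omega

theorem pv_shift_even (a k : Nat) : ((2*a : Nat) : Int) >>> (k+1) = ((a : Nat) : Int) >>> k := by
  have h1 : ((2*a : Nat) : Int) >>> (k+1) = (((2*a) >>> (k+1) : Nat) : Int) := rfl
  have h2 : ((a : Nat) : Int) >>> k = ((a >>> k : Nat) : Int) := rfl
  rw [h1, h2]
  congr 1
  rw [Nat.shiftRight_eq_div_pow, Nat.shiftRight_eq_div_pow, pow_succ']
  exact Nat.mul_div_mul_left a (2^k) (by omega)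

-- A's loop computes exactly B's straight-line answer (stated over Nat inputs)
theorem pvLoopA_eq (m : Nat) (hm : 0 < m) :
    ∀ t : Int, pvLoopA (m : Int) t = ((m : Int) >>> pvK m, t + (pvK m : Int)) := by
  induction m using Nat.strong_induction_on with
  | _ m ih =>
    intro t
    rcases Nat.even_or_odd m with ⟨a, hae⟩ | ⟨a, hao⟩
    · -- even: one loop iteration, then the IH at a
      have hm2 : m = 2*a := by omega
      have ha : 0 < a := by omega
      have hmod : PySem.Int.mod (m : Int) 2 = 0 :=
        (PySem.Int.mod_eq_zero_iff_dvd _ _).mpr ⟨(a : Int), by push_cast [hm2]; ring⟩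
      have hdiv : PySem.Int.floordiv (m : Int) 2 = (a : Int) := by
        rw [PySem.Int.floordiv_eq_ediv_of_pos (by omega)]
        omega
      rw [pvLoopA, dif_pos ⟨by exact_mod_cast hm, hmod⟩, hdiv]
      rw [ih a (by omega) ha (t+1), hm2, pvK_even a ha, pv_shift_even a (pvK a)]
      refine Prod.ext rfl ?_
      push_cast
      ring
    · -- odd: the loop exits immediately and pvK m = 0
      have hmod : PySem.Int.mod (m : Int) 2 = 1 := by
        rw [PySem.Int.mod_eq_emod_of_pos (by omega)]
        omega
      rw [pvLoopA, dif_neg (by rw [hmod]; rintro ⟨-, h⟩; exact one_ne_zero h)]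
      rw [pvK_odd m (by omega)]
      simp

theorem factor_n_py_spec : Claim_equal_factor_n_py := by
  intro n _ hpre
  obtain ⟨h3, _⟩ := hpre
  unfold Spec_factor_n_py factor_n_py factor_n_py_alt
  set m : Nat := (n - 1).toNat with hm
  have hcast : ((m : Nat) : Int) = n - 1 := by omega
  have hmpos : 0 < m := by omega
  rw [← hcast, pvLoopA_eq m hmpos 0]
  show (((m : Nat) : Int) >>> pvK m, 0 + (pvK m : Int))
      = (((m : Nat) : Int) >>> (PySem.Int.bitLength (PySem.Int.band ((m : Nat) : Int) (-((m : Nat) : Int))) - 1),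
         ((PySem.Int.bitLength (PySem.Int.band ((m : Nat) : Int) (-((m : Nat) : Int))) - 1 : Nat) : Int))
  rw [pv_band_neg_self m hmpos]
  refine Prod.ext rfl ?_
  simp [pvK]
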